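-- pv_equiv track=rewrite | github.com/aoimaru/2021-research | libs/structures.py | toToken
-- ===== SOURCE A (Python) =====
-- def toToken(contents):
--     tokens = []
--     for content in contents:
--         content = content.split()
--         while content:
--             word = content.pop(0)
--             if word:
--                 tokens.append(word)
--     return tokens
-- ===== SOURCE B (Python) =====
-- def toToken(contents):
--     return " ".join(contents).split()
-- ===== Notes on version B (the rewrite author's own statement) =====
-- stated objective: idiomatic
-- what changed: B replaces A's per-element split with a pop(0) while-loop and conditional append by a single ' '.join of all elements followed by one whitespace split of the whole string.
import Mathlib
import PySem

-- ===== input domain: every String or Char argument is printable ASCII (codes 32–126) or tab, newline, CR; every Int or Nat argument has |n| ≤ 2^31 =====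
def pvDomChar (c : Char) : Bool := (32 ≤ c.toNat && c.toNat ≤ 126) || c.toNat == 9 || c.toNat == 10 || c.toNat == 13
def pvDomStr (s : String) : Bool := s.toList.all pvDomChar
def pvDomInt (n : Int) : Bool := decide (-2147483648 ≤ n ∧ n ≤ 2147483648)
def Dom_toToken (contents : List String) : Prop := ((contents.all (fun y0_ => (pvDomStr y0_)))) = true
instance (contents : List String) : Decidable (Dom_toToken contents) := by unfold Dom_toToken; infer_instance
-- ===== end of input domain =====

-- B tokenizes everything in one go via " ".join(contents).split() instead of A's
-- per-element split with a pop(0) while-loop and conditional append (objective: idiomatic).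

-- ===== PORT A =====
-- inner 'while content: word = content.pop(0); if word: tokens.append(word)'
def toTokenWhile (content : List String) (tokens : List String) : List String :=
  match content with
  | [] => tokens
  | word :: rest => toTokenWhile rest (if word ≠ "" then tokens ++ [word] else tokens)

def toToken (contents : List String) : List String :=
  contents.foldl (fun tokens content => toTokenWhile (PySem.Str.split₀ content) tokens) []

-- ===== PORT B =====
def toToken_alt (contents : List String) : List String :=
  PySem.Str.split₀ (PySem.Str.join " " contents)

-- ===== PRECONDITION & SPEC =====
def Spec_toToken (contents : List String) (out : List String) : Prop := out = toToken_alt contents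
instance (contents : List String) (out : List String) : Decidable (Spec_toToken contents out) := by unfold Spec_toToken; infer_instance

-- ===== CLAIM (what is proved, stated in full; the proofs are below) =====
def Claim_equal_toToken : Prop := ∀ (contents : List String), Dom_toToken contents → Spec_toToken contents (toToken contents)

-- ===== LEMMAS AND PROOFS =====

-- the inner while-loop appends exactly the nonempty words, in order
theorem toTokenWhile_eq (content tokens : List String) :
    toTokenWhile content tokens = tokens ++ content.filter (fun w => w ≠ "") := by
  induction content generalizing tokens with
  | nil => simp [toTokenWhile]
  | cons w rest ih =>
    by_cases h : w = "" <;> simp [toTokenWhile, ih, h]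

theorem split₀_go_nil (cur : List Char) (acc : List (List Char)) :
    PySem.Chars.split₀.go [] cur acc =
      if cur.isEmpty then acc.reverse else (cur.reverse :: acc).reverse := rfl

theorem split₀_go_cons (c : Char) (rest cur : List Char) (acc : List (List Char)) :
    PySem.Chars.split₀.go (c :: rest) cur acc =
      if PySem.Chars.isspace c then
        (if cur.isEmpty then PySem.Chars.split₀.go rest [] acc
         else PySem.Chars.split₀.go rest [] (cur.reverse :: acc))
      else PySem.Chars.split₀.go rest (c :: cur) acc := rfl

-- the accumulator of split₀.go factors out
theorem split₀_go_acc (s cur : List Char) (acc : List (List Char)) :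
    PySem.Chars.split₀.go s cur acc = acc.reverse ++ PySem.Chars.split₀.go s cur [] := by
  induction s generalizing cur acc with
  | nil =>
    by_cases h : cur.isEmpty <;> simp [split₀_go_nil, h]
  | cons c rest ih =>
    by_cases hs : PySem.Chars.isspace c
    · by_cases hc : cur.isEmpty
      · simp only [split₀_go_cons, hs, hc, if_true]
        exact ih [] acc
      · simp only [split₀_go_cons, hs, hc, if_true, if_false, Bool.false_eq_true]
        rw [ih [] (cur.reverse :: acc), ih [] [cur.reverse]]
        simp
    · simp only [split₀_go_cons, hs, Bool.false_eq_true, if_false]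
      exact ih _ _

-- splitting at an explicit space concatenates the two splits
theorem split₀_go_space (a b cur : List Char) :
    PySem.Chars.split₀.go (a ++ ' ' :: b) cur [] =
      PySem.Chars.split₀.go a cur [] ++ PySem.Chars.split₀.go b [] [] := by
  induction a generalizing cur with
  | nil =>
    have hsp : PySem.Chars.isspace ' ' = true := by decide
    by_cases hc : cur.isEmpty
    · simp [split₀_go_cons, split₀_go_nil, hsp, hc]
    · simp [split₀_go_cons, split₀_go_nil, hsp, hc, split₀_go_acc b [] [cur.reverse]]
  | cons c rest ih =>
    by_cases hs : PySem.Chars.isspace c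
    · by_cases hc : cur.isEmpty <;>
        simp [split₀_go_cons, hs, hc, ih,
          split₀_go_acc rest [] [cur.reverse], split₀_go_acc (rest ++ ' ' :: b) [] [cur.reverse]]
    · simp [split₀_go_cons, hs, ih]

theorem chars_split₀_space (a b : List Char) :
    PySem.Chars.split₀ (a ++ ' ' :: b) = PySem.Chars.split₀ a ++ PySem.Chars.split₀ b := by
  simp [PySem.Chars.split₀, split₀_go_space]

-- split of the space-join is the concatenation of the splits
theorem chars_split₀_join (parts : List (List Char)) :
    PySem.Chars.split₀ (PySem.Chars.join [' '] parts) = parts.flatMap PySem.Chars.split₀ := by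
  induction parts with
  | nil => simp [PySem.Chars.join, List.intercalate]; rfl
  | cons x t ih =>
    cases t with
    | nil => simp [PySem.Chars.join, List.intercalate]
    | cons y t' =>
      have hj : PySem.Chars.join [' '] (x :: y :: t') =
          x ++ ' ' :: PySem.Chars.join [' '] (y :: t') := by
        simp [PySem.Chars.join, List.intercalate, List.intersperse]
      rw [hj, chars_split₀_space, ih]
      simp

-- every word produced by split₀.go is nonempty (given a nonempty accumulator)
theorem split₀_go_ne_nil (s cur : List Char) (acc : List (List Char))
    (hacc : ∀ w ∈ acc, w ≠ []) :
    ∀ w ∈ PySem.Chars.split₀.go s cur acc, w ≠ [] := by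
  induction s generalizing cur acc with
  | nil =>
    by_cases h : cur.isEmpty
    · simpa [split₀_go_nil, h] using fun w hw => hacc w hw
    · intro w hw
      simp only [PySem.Chars.split₀.go, h, Bool.false_eq_true, if_false,
        List.reverse_cons, List.mem_append, List.mem_reverse, List.mem_singleton] at hw
      rcases hw with hw | hw
      · exact hacc w hw
      · subst hw
        simpa [List.isEmpty_iff] using h
  | cons c rest ih =>
    by_cases hs : PySem.Chars.isspace c
    · by_cases hc : cur.isEmpty
      · simpa [split₀_go_cons, hs, hc] using ih [] acc hacc
      · simp only [split₀_go_cons, hs, hc, if_true, if_false, Bool.false_eq_true]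
        refine ih [] (cur.reverse :: acc) ?_
        intro w hw
        rcases List.mem_cons.mp hw with hw | hw
        · subst hw; simpa [List.isEmpty_iff] using hc
        · exact hacc w hw
    · simp only [split₀_go_cons, hs, Bool.false_eq_true, if_false]
      exact ih (c :: cur) acc hacc

theorem str_split₀_ne_empty (s : String) : ∀ w ∈ PySem.Str.split₀ s, w ≠ "" := by
  intro w hw hcontra
  have h : w.toList ∈ List.map String.toList (PySem.Str.split₀ s) := List.mem_map_of_mem hw
  rw [PySem.Str.split₀_map_toList] at h
  have := split₀_go_ne_nil s.toList [] [] (by simp) w.toList h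
  subst hcontra
  exact this rfl

-- B expressed as a flatMap of per-element splits
theorem toToken_alt_eq (contents : List String) :
    toToken_alt contents = contents.flatMap PySem.Str.split₀ := by
  apply List.map_injective_iff.mpr (fun _ _ h => String.toList_injective h)
  rw [toToken_alt, PySem.Str.split₀_map_toList, PySem.Str.toList_join]
  have : " ".toList = [' '] := rfl
  rw [this, chars_split₀_join, List.map_flatMap, List.flatMap_map]
  refine List.flatMap_congr ?_
  intro x _
  exact (PySem.Str.split₀_map_toList x).symm

-- ===== VERDICT (by name: the statement is the Claim_ definition above) =====
theorem toToken_spec : Claim_equal_toToken := by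
  intro contents _
  show toToken contents = toToken_alt contents
  rw [toToken, toToken_alt_eq]
  have h : ∀ (acc : List String), ∀ x ∈ contents,
      toTokenWhile (PySem.Str.split₀ x) acc = acc ++ PySem.Str.split₀ x := by
    intro acc x _
    rw [toTokenWhile_eq]
    congr 1
    exact List.filter_eq_self.mpr (fun w hw => by simpa using str_split₀_ne_empty x w hw)
  rw [PySem.List.foldl_congr_mem contents _
    (fun tokens content => tokens ++ PySem.Str.split₀ content) [] h]
  exact PySem.List.foldl_append_eq_flatMap _ _ _
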